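-- pv_equiv track=rewrite | github.com/omkar211/DailyWork | Day2-math1/MaxChunksToMakeSorted2.py | max_chuck
-- ===== SOURCE A (Python) =====
-- def max_chuck(arr):
--     count=0
--     for i in range(len(arr)):
--         for j in range(i):
--             if arr[j]>arr[i]:
--                 count+=1
--                 break
--     return count
-- ===== SOURCE B (Python) =====
-- def max_chuck(arr):
--     count = 0
--     mx = None
--     for x in arr:
--         if mx is not None and mx > x:
--             count += 1
--         else:
--             mx = x
--     return count
-- ===== Notes on version B (the rewrite author's own statement) =====
-- stated objective: faster
-- what changed: Replaced the nested scan over all earlier indices by a single pass that tracks the running prefix maximum and increments when it exceeds the current element.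
import Mathlib
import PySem

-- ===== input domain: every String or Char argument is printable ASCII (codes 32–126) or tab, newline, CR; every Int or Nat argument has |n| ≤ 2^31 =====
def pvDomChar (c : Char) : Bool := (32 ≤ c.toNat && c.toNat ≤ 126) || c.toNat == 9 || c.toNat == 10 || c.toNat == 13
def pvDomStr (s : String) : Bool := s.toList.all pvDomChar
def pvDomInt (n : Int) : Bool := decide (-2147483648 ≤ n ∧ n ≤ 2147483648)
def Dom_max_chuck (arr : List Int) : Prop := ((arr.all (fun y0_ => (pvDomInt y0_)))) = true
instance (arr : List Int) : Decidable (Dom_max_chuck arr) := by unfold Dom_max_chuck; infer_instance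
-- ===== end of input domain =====

-- B replaces A's quadratic nested scan by one pass tracking the running prefix maximum (faster, O(n) vs O(n^2)).

-- ===== PORT A =====
-- inner 'for j in range(i): if arr[j] > arr[i]: count += 1; break'
def innerA (arr : List Int) (v : Int) : List Int → Int → Int
  | [], c => c
  | j :: js, c =>
    if PySem.List.pyGetD arr j 0 > v then c + 1 else innerA arr v js c

def max_chuck (arr : List Int) : Int :=
  (PySem.List.pyRange 0 arr.length 1).foldl
    (fun c i => innerA arr (PySem.List.pyGetD arr i 0) (PySem.List.pyRange 0 i 1) c) 0

-- ===== PORT B =====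
-- one loop body: state (mx : Option Int, count); 'if mx is not None and mx > x: count += 1 else: mx = x'
def stepB (s : Option Int × Int) (x : Int) : Option Int × Int :=
  match s.1 with
  | some m => if m > x then (some m, s.2 + 1) else (some x, s.2)
  | none => (some x, s.2)

def max_chuck_alt (arr : List Int) : Int :=
  (arr.foldl stepB (none, 0)).2

-- ===== PRECONDITION & SPEC =====
def Spec_max_chuck (arr : List Int) (out : Int) : Prop := out = max_chuck_alt arr
instance (arr : List Int) (out : Int) : Decidable (Spec_max_chuck arr out) := by unfold Spec_max_chuck; infer_instance

-- ===== CLAIM (what is proved, stated in full; the proofs are below) =====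
def Claim_equal_max_chuck : Prop := ∀ (arr : List Int), Dom_max_chuck arr → Spec_max_chuck arr (max_chuck arr)

-- ===== LEMMAS AND PROOFS =====

-- the 'mx' component of B's state, as a standalone fold
def maxF (m : Option Int) (x : Int) : Option Int :=
  match m with
  | none => some x
  | some m => if m > x then some m else some x

def maxO (xs : List Int) : Option Int := xs.foldl maxF none

lemma maxF_some (m x : Int) : maxF (some m) x = some (max m x) := by
  unfold maxF
  rcases le_total m x with h | h
  · simp [max_eq_right h]; omega
  · rcases lt_or_eq_of_le h with h' | h'
    · simp [max_eq_left h, h']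
    · simp [h', max_self]

lemma foldl_maxF_some (xs : List Int) : ∀ m, xs.foldl maxF (some m) = some (xs.foldl max m) := by
  induction xs with
  | nil => intro m; rfl
  | cons y ys ih => intro m; simp only [List.foldl_cons, maxF_some]; exact ih (max m y)

lemma maxO_nil_iff (xs : List Int) : maxO xs = none ↔ xs = [] := by
  cases xs with
  | nil => simp [maxO]
  | cons y ys =>
    simp only [maxO, List.foldl_cons]
    have : maxF none y = some y := rfl
    rw [this, foldl_maxF_some]
    simp

lemma maxO_spec (xs : List Int) (m : Int) (h : maxO xs = some m) :
    m ∈ xs ∧ ∀ a ∈ xs, a ≤ m := by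
  cases xs with
  | nil => simp [maxO] at h
  | cons y ys =>
    simp only [maxO, List.foldl_cons] at h
    have hy : maxF none y = some y := rfl
    rw [hy, foldl_maxF_some] at h
    have hm : m = ys.foldl max y := (Option.some.inj h).symm
    subst hm
    constructor
    · rcases PySem.List.foldl_max_mem ys y with h1 | h1
      · rw [h1]; exact List.mem_cons_self
      · exact List.mem_cons_of_mem _ h1
    · intro a ha
      rcases List.mem_cons.mp ha with rfl | ha
      · exact (PySem.List.le_foldl_max ys a).1
      · exact (PySem.List.le_foldl_max ys y).2 a ha

-- innerA with a break = "+1 iff some earlier element is larger"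
lemma innerA_eq (arr : List Int) (v : Int) (js : List Int) (c : Int) :
    innerA arr v js c =
      if ∃ j ∈ js, PySem.List.pyGetD arr j 0 > v then c + 1 else c := by
  induction js with
  | nil => simp [innerA]
  | cons j js ih =>
    simp only [innerA, List.mem_cons, exists_eq_or_imp]
    by_cases h : PySem.List.pyGetD arr j 0 > v
    · simp [h]
    · simp [h, ih]

lemma exists_pyRange_gt (xs : List Int) (x v : Int) :
    (∃ j ∈ PySem.List.pyRange 0 (xs.length : Int) 1, PySem.List.pyGetD (xs ++ [x]) j 0 > v)
      ↔ ∃ a ∈ xs, a > v := by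
  constructor
  · rintro ⟨j, hj, hgt⟩
    rw [PySem.List.mem_pyRange_one] at hj
    have hjlt : j < ((xs ++ [x]).length : Int) := by simp; omega
    rw [PySem.List.pyGetD_eq_getElem _ 0 hj.1 hjlt] at hgt
    have hlt : j.toNat < xs.length := by omega
    rw [List.getElem_append_left hlt] at hgt
    exact ⟨xs[j.toNat], List.getElem_mem hlt, hgt⟩
  · rintro ⟨a, ha, hgt⟩
    obtain ⟨k, hk, rfl⟩ := List.getElem_of_mem ha
    refine ⟨(k : Int), ?_, ?_⟩
    · rw [PySem.List.mem_pyRange_one]; constructor <;> [omega; exact_mod_cast hk]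
    · have h0 : (0 : Int) ≤ (k : Int) := Int.natCast_nonneg _
      have hjlt : (k : Int) < ((xs ++ [x]).length : Int) := by simp; omega
      rw [PySem.List.pyGetD_eq_getElem _ 0 h0 hjlt]
      have hlt : (k : Int).toNat < xs.length := by omega
      rw [List.getElem_append_left hlt]
      simpa using hgt

-- snoc step for A
lemma max_chuck_snoc (xs : List Int) (x : Int) :
    max_chuck (xs ++ [x]) =
      max_chuck xs + (if ∃ a ∈ xs, a > x then 1 else 0) := by
  unfold max_chuck
  have hlen : (((xs ++ [x]).length : Int)) = (xs.length : Int) + 1 := by simp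
  rw [hlen, PySem.List.pyRange_one_succ_right (a := 0) (b := (xs.length : Int)) (by omega),
      List.foldl_append]
  -- the prefix part agrees between arr = xs ++ [x] and arr = xs
  have hpref :
      (PySem.List.pyRange 0 (xs.length : Int) 1).foldl
        (fun c i => innerA (xs ++ [x]) (PySem.List.pyGetD (xs ++ [x]) i 0)
          (PySem.List.pyRange 0 i 1) c) 0
      = (PySem.List.pyRange 0 (xs.length : Int) 1).foldl
        (fun c i => innerA xs (PySem.List.pyGetD xs i 0) (PySem.List.pyRange 0 i 1) c) 0 := by
    apply PySem.List.foldl_congr_mem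
    intro c i hi
    rw [PySem.List.mem_pyRange_one] at hi
    have hget : ∀ j : Int, 0 ≤ j → j < (xs.length : Int) →
        PySem.List.pyGetD (xs ++ [x]) j 0 = PySem.List.pyGetD xs j 0 := by
      intro j h0 hlt
      have hjlt : j < ((xs ++ [x]).length : Int) := by simp; omega
      rw [PySem.List.pyGetD_eq_getElem _ 0 h0 hjlt,
          PySem.List.pyGetD_eq_getElem _ 0 h0 hlt]
      exact List.getElem_append_left (by omega)
    rw [hget i hi.1 hi.2, innerA_eq, innerA_eq]
    congr 1
    simp only [eq_iff_iff]
    constructor <;> rintro ⟨j, hj, hgt⟩ <;>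
      refine ⟨j, hj, ?_⟩ <;>
      have hj' := PySem.List.mem_pyRange_one.mp hj
    · rwa [hget j hj'.1 (by omega)] at hgt
    · rwa [hget j hj'.1 (by omega)]
  rw [hpref]
  have hx : PySem.List.pyGetD (xs ++ [x]) (xs.length : Int) 0 = x := by
    have h0 : (0 : Int) ≤ (xs.length : Int) := by omega
    have hlt : ((xs.length : Int)) < ((xs ++ [x]).length : Int) := by simp
    rw [PySem.List.pyGetD_eq_getElem _ 0 h0 hlt]
    simp
  simp only [List.foldl_cons, List.foldl_nil, hx, innerA_eq, exists_pyRange_gt]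
  split_ifs <;> omega

-- the main invariant: B's fold state = (running max, A's count)
lemma foldl_stepB_eq (xs : List Int) :
    xs.foldl stepB (none, 0) = (maxO xs, max_chuck xs) := by
  induction xs using List.reverseRecOn with
  | nil => rfl
  | append_singleton xs x ih =>
    rw [List.foldl_append, ih, List.foldl_cons, List.foldl_nil]
    have hmax : maxO (xs ++ [x]) = maxF (maxO xs) x := by
      simp [maxO, List.foldl_append]
    rw [max_chuck_snoc]
    cases hm : maxO xs with
    | none =>
      have hnil : xs = [] := (maxO_nil_iff xs).mp hm
      subst hnil
      simp [stepB, maxO, maxF]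
    | some m =>
      obtain ⟨hmem, hub⟩ := maxO_spec xs m hm
      by_cases hgt : m > x
      · have hex : ∃ a ∈ xs, a > x := ⟨m, hmem, hgt⟩
        simp [stepB, hmax, hm, maxF, hgt, hex]
      · have hnex : ¬ ∃ a ∈ xs, a > x := by
          rintro ⟨a, ha, hax⟩
          exact hgt (lt_of_lt_of_le hax (hub a ha))
        simp [stepB, hmax, hm, maxF, hgt, hnex]

-- ===== VERDICT (by name: the statement is the Claim_ definition above) =====
theorem max_chuck_spec : Claim_equal_max_chuck := by
  intro arr _
  unfold Spec_max_chuck max_chuck_alt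
  rw [foldl_stepB_eq]
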